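-- pv_equiv track=rewrite | github.com/rajvamsi18/traffic_rag | src/extractor.py | build_group_totals
-- ===== SOURCE A (Python) =====
-- FAST_PASSENGER = ['two_wheelers', 'auto_rickshaw', 'car_jeep_van', 'mini_bus', 'standard_bus']
--
-- GOODS_VEHICLES = ['tempo', 'lcv', 'truck_2axle', 'truck_3axle', 'mav',
--                   'tractor_with_trailer', 'tractor_without_trailer']
--
-- SLOW_MODES     = ['cycle', 'cycle_rickshaw', 'animal_drawn']
--
-- ALL_MOTORISED  = FAST_PASSENGER + GOODS_VEHICLES
--
-- ALL_NON_MOTOR  = SLOW_MODES + ['other']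
--
-- def build_group_totals(vdict):
--     """Add category subtotals to a vehicle count dict."""
--     t = dict(vdict)
--     t['total_fast_passenger'] = sum(vdict.get(v, 0) for v in FAST_PASSENGER)
--     t['total_goods']          = sum(vdict.get(v, 0) for v in GOODS_VEHICLES)
--     t['total_slow_modes']     = sum(vdict.get(v, 0) for v in SLOW_MODES)
--     t['total_motorised']      = sum(vdict.get(v, 0) for v in ALL_MOTORISED)
--     t['total_non_motorised']  = sum(vdict.get(v, 0) for v in ALL_NON_MOTOR)
--     return t
-- ===== SOURCE B (Python) =====
-- FAST_PASSENGER = ['two_wheelers', 'auto_rickshaw', 'car_jeep_van', 'mini_bus', 'standard_bus']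
--
-- GOODS_VEHICLES = ['tempo', 'lcv', 'truck_2axle', 'truck_3axle', 'mav',
--                   'tractor_with_trailer', 'tractor_without_trailer']
--
-- SLOW_MODES     = ['cycle', 'cycle_rickshaw', 'animal_drawn']
--
-- _FAST  = frozenset(FAST_PASSENGER)
-- _GOODS = frozenset(GOODS_VEHICLES)
-- _SLOW  = frozenset(SLOW_MODES)
--
-- def build_group_totals(vdict):
--     """Add category subtotals to a vehicle count dict (single classifying pass)."""
--     fp = g = s = m = nm = 0
--     for k, v in vdict.items():
--         if k in _FAST:
--             fp += v; m += v
--         elif k in _GOODS: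
--             g += v; m += v
--         elif k in _SLOW:
--             s += v; nm += v
--         elif k == 'other':
--             nm += v
--     t = dict(vdict)
--     t['total_fast_passenger'] = fp
--     t['total_goods']          = g
--     t['total_slow_modes']     = s
--     t['total_motorised']      = m
--     t['total_non_motorised']  = nm
--     return t
-- ===== Notes on version B (the rewrite author's own statement) =====
-- stated objective: idiomatic
-- what changed: Replaces A's five separate passes over the fixed category lists (each doing dict lookups) by a single pass over the input dict that classifies each key via set membership and accumulates the five totals at once.
import Mathlib
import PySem

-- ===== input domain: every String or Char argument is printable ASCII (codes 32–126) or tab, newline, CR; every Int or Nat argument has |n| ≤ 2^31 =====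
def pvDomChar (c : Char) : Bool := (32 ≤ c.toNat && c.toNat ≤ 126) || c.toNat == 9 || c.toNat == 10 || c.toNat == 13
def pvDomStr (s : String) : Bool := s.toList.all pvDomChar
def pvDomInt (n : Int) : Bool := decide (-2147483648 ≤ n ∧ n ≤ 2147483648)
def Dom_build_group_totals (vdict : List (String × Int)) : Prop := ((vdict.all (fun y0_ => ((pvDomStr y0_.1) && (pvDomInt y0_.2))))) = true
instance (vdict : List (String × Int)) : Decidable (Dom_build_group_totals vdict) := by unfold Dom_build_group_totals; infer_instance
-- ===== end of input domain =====

-- B replaces A's five passes over fixed category lists by one classifying pass over the input dict (set membership); equivalent on duplicate-free association lists.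


-- ===== PORT A =====
def pvFAST : List String := ["two_wheelers", "auto_rickshaw", "car_jeep_van", "mini_bus", "standard_bus"]
def pvGOODS : List String := ["tempo", "lcv", "truck_2axle", "truck_3axle", "mav",
                              "tractor_with_trailer", "tractor_without_trailer"]
def pvSLOW : List String := ["cycle", "cycle_rickshaw", "animal_drawn"]
def pvALLMOT : List String := pvFAST ++ pvGOODS
def pvALLNON : List String := pvSLOW ++ ["other"]

-- sum(vdict.get(v, 0) for v in cats)
def pvSumCat (vdict : List (String × Int)) (cats : List String) : Int :=
  cats.foldl (fun acc v => acc + (PySem.Dict.mk vdict).getD v 0) 0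

def build_group_totals (vdict : List (String × Int)) : List (String × Int) :=
  let t := PySem.Dict.mk vdict
  let t := t.insert "total_fast_passenger" (pvSumCat vdict pvFAST)
  let t := t.insert "total_goods"          (pvSumCat vdict pvGOODS)
  let t := t.insert "total_slow_modes"     (pvSumCat vdict pvSLOW)
  let t := t.insert "total_motorised"      (pvSumCat vdict pvALLMOT)
  let t := t.insert "total_non_motorised"  (pvSumCat vdict pvALLNON)
  t.items

-- ===== PORT B =====
-- one pass over the items: classify each key, accumulate the five totals
def pvStep (a : Int × Int × Int × Int × Int) (kv : String × Int) : Int × Int × Int × Int × Int :=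
  let (fp, g, s, m, nm) := a
  if pvFAST.contains kv.1 then (fp + kv.2, g, s, m + kv.2, nm)
  else if pvGOODS.contains kv.1 then (fp, g + kv.2, s, m + kv.2, nm)
  else if pvSLOW.contains kv.1 then (fp, g, s + kv.2, m, nm + kv.2)
  else if kv.1 == "other" then (fp, g, s, m, nm + kv.2)
  else a

def build_group_totals_alt (vdict : List (String × Int)) : List (String × Int) :=
  let (fp, g, s, m, nm) := vdict.foldl pvStep (0, 0, 0, 0, 0)
  let t := PySem.Dict.mk vdict
  let t := t.insert "total_fast_passenger" fp
  let t := t.insert "total_goods"          g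
  let t := t.insert "total_slow_modes"     s
  let t := t.insert "total_motorised"      m
  let t := t.insert "total_non_motorised"  nm
  t.items

-- ===== PRECONDITION & SPEC =====
-- Pre_ excludes association lists with duplicate keys: they do not faithfully encode a
-- Python dict (Python collapses duplicates before the function ever runs).
def Pre_build_group_totals (vdict : List (String × Int)) : Prop :=
  (vdict.map Prod.fst).Nodup
instance (vdict : List (String × Int)) : Decidable (Pre_build_group_totals vdict) := by
  unfold Pre_build_group_totals; infer_instance

def pvWitness_build_group_totals : (List (String × Int)) :=
  [("car_jeep_van", 3), ("truck_2axle", 2), ("other", 1)]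

def Spec_build_group_totals (vdict : List (String × Int)) (out : List (String × Int)) : Prop := out = build_group_totals_alt vdict
instance (vdict : List (String × Int)) (out : List (String × Int)) : Decidable (Spec_build_group_totals vdict out) := by unfold Spec_build_group_totals; infer_instance

-- ===== CLAIM (what is proved, stated in full; the proofs are below) =====
def Claim_equal_build_group_totals : Prop := ∀ (vdict : List (String × Int)), Dom_build_group_totals vdict → Pre_build_group_totals vdict → Spec_build_group_totals vdict (build_group_totals vdict)

-- ===== LEMMAS AND PROOFS =====

-- sum of the values of the entries whose key satisfies p
def pvSel (p : String → Bool) (vdict : List (String × Int)) : Int :=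
  ((vdict.filter (fun kv => p kv.1)).map (·.2)).sum

-- the four classification predicates are mutually exclusive
theorem pvFast_excl (k : String) (h : k ∈ pvFAST) :
    k ∉ pvGOODS ∧ k ∉ pvSLOW ∧ k ≠ "other" := by
  fin_cases h <;> decide

theorem pvGoods_excl (k : String) (h : k ∈ pvGOODS) :
    k ∉ pvFAST ∧ k ∉ pvSLOW ∧ k ≠ "other" := by
  fin_cases h <;> decide

theorem pvSlow_excl (k : String) (h : k ∈ pvSLOW) :
    k ∉ pvFAST ∧ k ∉ pvGOODS ∧ k ≠ "other" := by
  fin_cases h <;> decide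

theorem pvSel_cons (p : String → Bool) (k : String) (v : Int) (rest : List (String × Int)) :
    pvSel p ((k, v) :: rest) = (if p k then v else 0) + pvSel p rest := by
  simp [pvSel, List.filter_cons]
  split <;> simp

-- B's fold computes the five selective sums
theorem pvFold_eq (vdict : List (String × Int)) (fp g s m nm : Int) :
    vdict.foldl pvStep (fp, g, s, m, nm) =
      (fp + pvSel (fun k => pvFAST.contains k) vdict,
       g + pvSel (fun k => pvGOODS.contains k) vdict,
       s + pvSel (fun k => pvSLOW.contains k) vdict,
       m + pvSel (fun k => pvALLMOT.contains k) vdict,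
       nm + pvSel (fun k => pvALLNON.contains k) vdict) := by
  induction vdict generalizing fp g s m nm with
  | nil => simp [pvSel]
  | cons kv rest ih =>
    obtain ⟨k, v⟩ := kv
    rw [List.foldl_cons]
    by_cases hf : k ∈ pvFAST
    · obtain ⟨h1, h2, h3⟩ := pvFast_excl k hf
      have hstep : pvStep (fp, g, s, m, nm) (k, v) = (fp + v, g, s, m + v, nm) := by
        simp [pvStep, hf]
      rw [hstep, ih]
      simp [pvSel_cons, pvALLMOT, pvALLNON, hf, h1, h2, h3]
      omega
    · by_cases hg : k ∈ pvGOODS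
      · obtain ⟨h1, h2, h3⟩ := pvGoods_excl k hg
        have hstep : pvStep (fp, g, s, m, nm) (k, v) = (fp, g + v, s, m + v, nm) := by
          simp [pvStep, hg, h1]
        rw [hstep, ih]
        simp [pvSel_cons, pvALLMOT, pvALLNON, hg, h1, h2, h3]
        omega
      · by_cases hs : k ∈ pvSLOW
        · obtain ⟨h1, h2, h3⟩ := pvSlow_excl k hs
          have hstep : pvStep (fp, g, s, m, nm) (k, v) = (fp, g, s + v, m, nm + v) := by
            simp [pvStep, hs, h1, h2]
          rw [hstep, ih]
          simp [pvSel_cons, pvALLMOT, pvALLNON, hs, h1, h2, h3]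
          omega
        · by_cases ho : k = "other"
          · subst ho
            have hstep : pvStep (fp, g, s, m, nm) ("other", v) = (fp, g, s, m, nm + v) := by
              simp [pvStep, hf, hg, hs]
            rw [hstep, ih]
            simp [pvSel_cons, pvALLMOT, pvALLNON, hf, hg, hs]
            omega
          · have hstep : pvStep (fp, g, s, m, nm) (k, v) = (fp, g, s, m, nm) := by
              simp [pvStep, hf, hg, hs, ho]
            rw [hstep, ih]
            simp [pvSel_cons, pvALLMOT, pvALLNON, hf, hg, hs, ho]

-- a key absent from the list looks up to the default
theorem pvGetD_not_mem (vdict : List (String × Int)) (k : String)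
    (h : k ∉ vdict.map Prod.fst) : (PySem.Dict.mk vdict).getD k 0 = 0 := by
  induction vdict with
  | nil => rfl
  | cons kv rest ih =>
    obtain ⟨k', v⟩ := kv
    simp at h
    rw [PySem.Dict.getD_eq_get?_getD, PySem.Dict.get?_mk_cons]
    have hne : (k' == k) = false := by simp; exact fun e => h.1 e.symm
    rw [hne]
    simp only [Bool.false_eq_true, if_false, ← PySem.Dict.getD_eq_get?_getD]
    exact ih (fun hm => absurd hm (by simpa using h.2))

-- one entry peeled off a nodup-key dict: its contribution to the category sum
theorem pvMapSum_cons (cats : List String) (hc : cats.Nodup) (k : String) (v : Int)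
    (rest : List (String × Int)) (hk : k ∉ rest.map Prod.fst) :
    (cats.map (fun c => (PySem.Dict.mk ((k, v) :: rest)).getD c 0)).sum
      = (if cats.contains k then v else 0)
        + (cats.map (fun c => (PySem.Dict.mk rest).getD c 0)).sum := by
  induction cats with
  | nil => simp
  | cons c cs ih =>
    have hcs : cs.Nodup := (List.nodup_cons.mp hc).2
    have hget : ∀ c' : String, c' ≠ k →
        (PySem.Dict.mk ((k, v) :: rest)).getD c' 0 = (PySem.Dict.mk rest).getD c' 0 := by
      intro c' hne
      rw [PySem.Dict.getD_eq_get?_getD, PySem.Dict.get?_mk_cons]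
      have : (k == c') = false := by simp; exact fun e => hne e.symm
      rw [this]
      simp only [Bool.false_eq_true, if_false, ← PySem.Dict.getD_eq_get?_getD]
    by_cases hck : c = k
    · subst hck
      have hknotin : c ∉ cs := (List.nodup_cons.mp hc).1
      have hhead : (PySem.Dict.mk ((c, v) :: rest)).getD c 0 = v := by
        rw [PySem.Dict.getD_eq_get?_getD, PySem.Dict.get?_mk_cons]
        simp
      have htail : (cs.map (fun c' => (PySem.Dict.mk ((c, v) :: rest)).getD c' 0))
          = cs.map (fun c' => (PySem.Dict.mk rest).getD c' 0) := by
        apply List.map_congr_left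
        intro c' hc'
        exact hget c' (fun e => hknotin (e ▸ hc'))
      have hrest0 : (PySem.Dict.mk rest).getD c 0 = 0 := pvGetD_not_mem rest c hk
      simp [hhead, htail, hrest0]
    · rw [List.map_cons, List.map_cons, List.sum_cons, List.sum_cons, hget c hck, ih hcs]
      have : ((c :: cs).contains k) = cs.contains k := by
        simp
        exact fun e => absurd e.symm hck
      rw [this]
      split <;> omega

-- A's category sum over nodup keys equals the selective sum over the entries
theorem pvSumCat_eq (cats : List String) (hc : cats.Nodup)
    (vdict : List (String × Int)) (hn : (vdict.map Prod.fst).Nodup) :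
    pvSumCat vdict cats = pvSel (fun k => cats.contains k) vdict := by
  rw [pvSumCat, PySem.List.foldl_add, zero_add]
  induction vdict with
  | nil =>
    have : ∀ c : String, (PySem.Dict.mk ([] : List (String × Int))).getD c 0 = 0 :=
      fun c => rfl
    simp [pvSel, this]
  | cons kv rest ih =>
    obtain ⟨k, v⟩ := kv
    simp only [List.map_cons, List.nodup_cons] at hn
    rw [pvMapSum_cons cats hc k v rest hn.1, pvSel_cons, ih hn.2]

theorem pvNodup_cats :
    pvFAST.Nodup ∧ pvGOODS.Nodup ∧ pvSLOW.Nodup ∧ pvALLMOT.Nodup ∧ pvALLNON.Nodup := by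
  decide

-- ===== VERDICT (by name: the statement is the Claim_ definition above) =====
theorem build_group_totals_spec : Claim_equal_build_group_totals := by
  intro vdict _ hpre
  unfold Spec_build_group_totals build_group_totals build_group_totals_alt
  obtain ⟨n1, n2, n3, n4, n5⟩ := pvNodup_cats
  rw [pvFold_eq]
  simp only [zero_add]
  rw [pvSumCat_eq _ n1 _ hpre, pvSumCat_eq _ n2 _ hpre, pvSumCat_eq _ n3 _ hpre,
      pvSumCat_eq _ n4 _ hpre, pvSumCat_eq _ n5 _ hpre]
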